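-- pv_equiv track=rewrite | github.com/pypi-data/pypi-mirror-317 | packages/macrostrat.database/macrostrat_database-3.5.2.tar.gz/macrostrat_database-3.5.2/macrostrat/database/utils.py | infer_is_sql_text
-- ===== SOURCE A (Python) =====
-- def infer_is_sql_text(_string: str) -> bool:
--     """
--     Return True if the string is a valid SQL query,
--     false if it should be interpreted as a file path.
--     """
--     # If it's a byte string, decode it
--     if isinstance(_string, bytes):
--         _string = _string.decode("utf-8")
--
--     lines = _string.split("\n")
--     if len(lines) > 1:
--         return True
--     _string = _string.lower()
--     for i in _sql_keywords:
--         if _string.strip().startswith(i.lower() + " "):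
--             return True
--     return False
--
-- _sql_keywords = [
--     "SELECT",
--     "INSERT",
--     "UPDATE",
--     "CREATE",
--     "DROP",
--     "DELETE",
--     "ALTER",
--     "SET",
--     "GRANT",
--     "WITH",
--     "NOTIFY",
--     "COPY",
-- ]
-- ===== SOURCE B (Python) =====
-- _PATTERNS = [
--     "select ", "insert ", "update ", "create ", "drop ", "delete ",
--     "alter ", "set ", "grant ", "with ", "notify ", "copy ",
-- ]
--
--
-- def infer_is_sql_text(_string: str) -> bool:
--     """
--     Return True if the string is a valid SQL query,
--     false if it should be interpreted as a file path.
--     """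
--     # If it's a byte string, decode it
--     if isinstance(_string, bytes):
--         _string = _string.decode("utf-8")
--
--     if len(_string.split("\n")) > 1:
--         return True
--     # Simultaneous multi-pattern matcher: walk the string character by
--     # character, keeping the still-viable pattern suffixes; accept as soon
--     # as one pattern is fully consumed.
--     cands = _PATTERNS
--     for ch in _string.lower().strip():
--         cands = [w[1:] for w in cands if w[:1] == ch]
--         if "" in cands:
--             return True
--         if not cands:
--             return False
--     return False
-- ===== Notes on version B (the rewrite author's own statement) =====
-- stated objective: alternative
-- what changed: A tests each keyword separately with startswith; B runs a simultaneous multi-pattern matcher that scans the string once, character by character, maintaining the set of still-viable pattern suffixes and accepting when one pattern is fully consumed.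
import Mathlib
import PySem

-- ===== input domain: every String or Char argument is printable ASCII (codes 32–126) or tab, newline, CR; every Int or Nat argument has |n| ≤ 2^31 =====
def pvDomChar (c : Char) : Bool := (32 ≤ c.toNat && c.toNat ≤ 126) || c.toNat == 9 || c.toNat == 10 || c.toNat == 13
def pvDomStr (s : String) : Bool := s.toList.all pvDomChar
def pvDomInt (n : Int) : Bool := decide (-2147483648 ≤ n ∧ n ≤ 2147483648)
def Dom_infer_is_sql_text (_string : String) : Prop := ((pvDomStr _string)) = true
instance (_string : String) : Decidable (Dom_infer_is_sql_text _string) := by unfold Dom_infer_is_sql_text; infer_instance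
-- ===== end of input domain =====

-- B replaces A's per-keyword startswith scan by a single character-by-character simultaneous multi-pattern matcher over a shrinking candidate set (alternative algorithm; return value only).


-- ===== PORT A =====
def sqlKeywords : List String :=
  ["SELECT", "INSERT", "UPDATE", "CREATE", "DROP", "DELETE",
   "ALTER", "SET", "GRANT", "WITH", "NOTIFY", "COPY"]

def infer_is_sql_text (_string : String) : Bool :=
  let lines := PySem.Chars.splitOn _string.toList ['\n']
  if lines.length > 1 then true
  else
    let s := PySem.Str.lower _string
    sqlKeywords.any (fun i => PySem.Str.startswith (PySem.Str.strip s) (PySem.Str.lower i ++ " "))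

-- ===== PORT B =====
def sqlPatterns : List (List Char) :=
  [['s','e','l','e','c','t',' '], ['i','n','s','e','r','t',' '],
   ['u','p','d','a','t','e',' '], ['c','r','e','a','t','e',' '],
   ['d','r','o','p',' '], ['d','e','l','e','t','e',' '],
   ['a','l','t','e','r',' '], ['s','e','t',' '],
   ['g','r','a','n','t',' '], ['w','i','t','h',' '],
   ['n','o','t','i','f','y',' '], ['c','o','p','y',' ']]

-- the for-loop of Source B: one comprehension pass per character ([w[1:] for w in cands if w[:1] == ch]),
-- then the two early returns; w[:1] is take 1 and w[1:] is drop 1 (both exact for these slices)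
def runScan : List (List Char) → List Char → Bool
  | _, [] => false
  | cands, c :: rest =>
    let nxt := cands.filterMap (fun w => if w.take 1 == [c] then some (w.drop 1) else none)
    if nxt.contains [] then true
    else if nxt.isEmpty then false
    else runScan nxt rest

def infer_is_sql_text_alt (_string : String) : Bool :=
  if (PySem.Chars.splitOn _string.toList ['\n']).length > 1 then true
  else runScan sqlPatterns (PySem.Chars.strip (PySem.Chars.lower _string.toList))

-- ===== PRECONDITION & SPEC =====
def Spec_infer_is_sql_text (_string : String) (out : Bool) : Prop := out = infer_is_sql_text_alt _string
instance (_string : String) (out : Bool) : Decidable (Spec_infer_is_sql_text _string out) := by unfold Spec_infer_is_sql_text; infer_instance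

-- ===== CLAIM (what is proved, stated in full; the proofs are below) =====
def Claim_equal_infer_is_sql_text : Prop := ∀ (_string : String), Dom_infer_is_sql_text _string → Spec_infer_is_sql_text _string (infer_is_sql_text _string)

-- ===== LEMMAS AND PROOFS =====

-- membership in one comprehension step of B's matcher
lemma mem_step (cands : List (List Char)) (c : Char) (t : List Char) :
    t ∈ cands.filterMap (fun w => if w.take 1 == [c] then some (w.drop 1) else none)
      ↔ (c :: t) ∈ cands := by
  simp only [List.mem_filterMap]
  constructor
  · rintro ⟨w, hw, hcond⟩
    by_cases hc : w.take 1 == [c]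
    · rw [if_pos hc] at hcond
      have ht : w.drop 1 = t := Option.some.inj hcond
      have hh : w.take 1 = [c] := by simpa using hc
      have hw' : w = c :: t := by
        have h3 := List.take_append_drop 1 w
        rw [hh, ht] at h3
        exact h3.symm
      exact hw' ▸ hw
    · rw [if_neg hc] at hcond
      exact absurd hcond (by simp)
  · intro h
    exact ⟨c :: t, h, by simp⟩

-- B's matcher computes exactly "some candidate is a prefix", as long as no candidate is empty
lemma runScan_eq (cs : List Char) :
    ∀ (cands : List (List Char)), [] ∉ cands →
      runScan cands cs = cands.any (fun w => decide (w <+: cs)) := by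
  induction cs with
  | nil =>
    intro cands h
    simp only [runScan]
    refine ((List.any_eq_false).mpr ?_).symm
    intro w hw
    simp only [decide_eq_true_eq, List.prefix_nil]
    exact fun he => h (he ▸ hw)
  | cons c rest ih =>
    intro cands h
    simp only [runScan]
    set nxt := cands.filterMap (fun w => if w.take 1 == [c] then some (w.drop 1) else none) with hn
    by_cases h1 : ([] : List Char) ∈ nxt
    · have hc : ([c] : List Char) ∈ cands := (mem_step cands c []).mp h1
      have hcon : nxt.contains [] = true := by
        rw [List.contains_eq_mem]; exact decide_eq_true h1
      rw [hcon, if_pos rfl]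
      symm
      rw [List.any_eq_true]
      exact ⟨[c], hc, by simp⟩
    · have hcon : nxt.contains [] = false := by
        rw [List.contains_eq_mem]; exact decide_eq_false h1
      rw [hcon]
      simp only [Bool.false_eq_true, if_false]
      by_cases h2 : nxt = []
      · have he : nxt.isEmpty = true := by simp [h2]
        rw [he, if_pos rfl]
        refine ((List.any_eq_false).mpr ?_).symm
        intro w hw
        simp only [decide_eq_true_eq]
        intro hp
        rcases w with _ | ⟨a, w'⟩
        · exact h hw
        · obtain ⟨hac, _⟩ := List.cons_prefix_cons.mp hp
          have hmem : w' ∈ nxt := (mem_step cands c w').mpr (hac ▸ hw)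
          rw [h2] at hmem
          exact absurd hmem (List.not_mem_nil)
      · have hne : nxt.isEmpty = false := by
          simpa [List.isEmpty_iff] using h2
        rw [hne]
        simp only [Bool.false_eq_true, if_false]
        rw [ih nxt h1]
        rw [Bool.eq_iff_iff]
        simp only [List.any_eq_true, decide_eq_true_eq]
        constructor
        · rintro ⟨t, ht, hp⟩
          exact ⟨c :: t, (mem_step cands c t).mp ht, List.cons_prefix_cons.mpr ⟨rfl, hp⟩⟩
        · rintro ⟨w, hw, hp⟩
          rcases w with _ | ⟨a, w'⟩
          · exact absurd hw h
          · obtain ⟨hac, hp'⟩ := List.cons_prefix_cons.mp hp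
            exact ⟨w', (mem_step cands c w').mpr (hac ▸ hw), hp'⟩

-- A's keyword scan on any string equals B's matcher on its characters
lemma scan_eq_run (t : String) :
    sqlKeywords.any (fun i => PySem.Str.startswith t (PySem.Str.lower i ++ " "))
      = runScan sqlPatterns t.toList := by
  rw [runScan_eq t.toList sqlPatterns (by decide)]
  have l1 : PySem.Chars.lower ['S','E','L','E','C','T'] = "select".toList := by decide
  have l2 : PySem.Chars.lower ['I','N','S','E','R','T'] = "insert".toList := by decide
  have l3 : PySem.Chars.lower ['U','P','D','A','T','E'] = "update".toList := by decide
  have l4 : PySem.Chars.lower ['C','R','E','A','T','E'] = "create".toList := by decide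
  have l5 : PySem.Chars.lower ['D','R','O','P'] = "drop".toList := by decide
  have l6 : PySem.Chars.lower ['D','E','L','E','T','E'] = "delete".toList := by decide
  have l7 : PySem.Chars.lower ['A','L','T','E','R'] = "alter".toList := by decide
  have l8 : PySem.Chars.lower ['S','E','T'] = "set".toList := by decide
  have l9 : PySem.Chars.lower ['G','R','A','N','T'] = "grant".toList := by decide
  have l10 : PySem.Chars.lower ['W','I','T','H'] = "with".toList := by decide
  have l11 : PySem.Chars.lower ['N','O','T','I','F','Y'] = "notify".toList := by decide
  have l12 : PySem.Chars.lower ['C','O','P','Y'] = "copy".toList := by decide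
  rw [Bool.eq_iff_iff]
  simp [sqlKeywords, sqlPatterns, List.any_cons,
    l1,l2,l3,l4,l5,l6,l7,l8,l9,l10,l11,l12, PySem.Chars.startswith_iff]

-- ===== VERDICT (by name: the statement is the Claim_ definition above) =====
theorem infer_is_sql_text_spec : Claim_equal_infer_is_sql_text := by
  intro s _
  unfold Spec_infer_is_sql_text
  simp only [infer_is_sql_text, infer_is_sql_text_alt]
  by_cases h : (PySem.Chars.splitOn s.toList ['\n']).length > 1
  · simp [h]
  · have hb : (PySem.Str.strip (PySem.Str.lower s)).toList
        = PySem.Chars.strip (PySem.Chars.lower s.toList) := by simp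
    rw [if_neg h, if_neg h, scan_eq_run (PySem.Str.strip (PySem.Str.lower s)), hb]
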